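-- pv_equiv track=rewrite | github.com/bellecode20/staedy | month_05/taeeun/사탕 가방.py | max_candies_per_bag
-- ===== SOURCE A (Python) =====
-- def max_candies_per_bag(n, m, candies):
--     left, right = 1, max(candies)
--     result = 0
--
--     while left <= right:
--         mid = (left + right) // 2
--         total_bags = sum(candy // mid for candy in candies)
--
--         if total_bags >= m:
--             result = mid
--             left = mid + 1
--         else:
--             right = mid - 1
--
--     return result
-- ===== SOURCE B (Python) =====
-- def max_candies_per_bag(n, m, candies):
--     mx = max(candies)
--     counts = {}
--     for c in candies:
--         if c > 0:
--             counts[c] = counts.get(c, 0) + 1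
--     total = sum(c * k for c, k in counts.items())
--     # any divisor d putting >= m candies into bags satisfies d*m <= total (for m > 0)
--     d = mx if m <= 0 else min(mx, total // m)
--     while d >= 1:
--         if sum((c // d) * k for c, k in counts.items()) >= m:
--             return d
--         # each quotient c//x equals c//d for all x in (c//(c//d+1), d]; jump below every such span
--         d = max((c // (c // d + 1) for c in counts), default=0)
--     return 0
-- ===== Notes on version B (the rewrite author's own statement) =====
-- stated objective: alternative
-- what changed: Replaces A's binary search with a descending divisor-block jump scan: candies are aggregated once into a value-to-count dict, the scan starts at the arithmetic bound min(max(candies), total//m) and jumps between blocks on which every quotient c//d is constant, returning the first divisor that yields at least m bags.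
-- outside the precondition, e.g. on max_candies_per_bag(2, 0, [5, -4]): A returns 2, B returns 5; on max_candies_per_bag(1, 1, []): A raises ValueError, B raises ValueError
import Mathlib
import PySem

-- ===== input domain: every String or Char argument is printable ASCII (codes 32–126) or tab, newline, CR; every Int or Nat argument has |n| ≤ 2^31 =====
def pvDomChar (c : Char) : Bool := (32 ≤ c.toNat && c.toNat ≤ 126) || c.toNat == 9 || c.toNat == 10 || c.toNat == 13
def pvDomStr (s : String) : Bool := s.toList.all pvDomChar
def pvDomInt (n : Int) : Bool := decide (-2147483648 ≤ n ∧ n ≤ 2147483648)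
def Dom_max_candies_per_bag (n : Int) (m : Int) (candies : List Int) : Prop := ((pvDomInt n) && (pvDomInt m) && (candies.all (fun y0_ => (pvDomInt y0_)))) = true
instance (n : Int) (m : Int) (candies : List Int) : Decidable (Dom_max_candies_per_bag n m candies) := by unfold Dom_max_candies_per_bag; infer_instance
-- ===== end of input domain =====

-- B replaces A's binary search with a descending divisor-block jump scan over a value->count dict (a different algorithm of similar cost); A mutates nothing; equivalence is claimed on nonempty single-sign lists.


-- ===== PORT A =====
-- A's while-loop, as well-founded recursion on the gap right - left
def pvGoA (m : Int) (candies : List Int) (left right result : Int) : Int :=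
  if h : left ≤ right then
    let mid := PySem.Int.floordiv (left + right) 2
    let total_bags := (candies.map (fun candy => PySem.Int.floordiv candy mid)).sum
    if total_bags ≥ m then
      pvGoA m candies (mid + 1) right mid
    else
      pvGoA m candies left (mid - 1) result
  else result
termination_by (right + 1 - left).toNat
decreasing_by
  all_goals
    have hb := PySem.Int.floordiv_two_mid_bounds h
    omega

def max_candies_per_bag (n : Int) (m : Int) (candies : List Int) : Int :=
  match PySem.List.max? candies (fun c => c) with
  | none => 0   -- Python raises ValueError on max([]); excluded by Pre_
  | some mx => pvGoA m candies 1 mx 0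

-- ===== PORT B =====
-- B's first loop: counts[c] = counts.get(c, 0) + 1 for the positive candies
def pvCounts (candies : List Int) : PySem.Dict Int Int :=
  candies.foldl (fun d c => if 0 < c then d.insert c (d.getD c 0 + 1) else d) PySem.Dict.empty

-- B's jump expression: max((c // (c // d + 1) for c in counts), default=0)
def pvJump (counts : PySem.Dict Int Int) (d : Int) : Int :=
  match PySem.List.max?
      ((PySem.Dict.keys counts).map
        (fun c => PySem.Int.floordiv c (PySem.Int.floordiv c d + 1))) (fun x => x) with
  | none => 0
  | some j => j

-- every key of pvCounts is positive (needed to terminate B's while-loop)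
lemma pvCounts_keys_pos (candies : List Int) : ∀ c ∈ (pvCounts candies).keys, 0 < c := by
  intro c hc
  unfold pvCounts at hc
  rw [show (fun (d : PySem.Dict Int Int) (c : Int) =>
        if 0 < c then d.insert c (d.getD c 0 + 1) else d)
      = (fun d c => if (decide (0 < c)) = true then d.insert c (d.getD c 0 + 1) else d) by
    funext d c; simp] at hc
  rw [← List.foldl_filter] at hc
  rw [PySem.Dict.foldl_insert_getD_add_one_eq_counter, PySem.Dict.keys_counter] at hc
  have := (PySem.Set.mem_ofList _ _).mp hc
  have := List.of_mem_filter this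
  simpa using this

-- the jump strictly decreases the divisor (positive keys only)
lemma pvJump_lt (counts : PySem.Dict Int Int) (d : Int) (hd : 1 ≤ d)
    (hpos : ∀ c ∈ counts.keys, 0 < c) : pvJump counts d < d := by
  unfold pvJump
  cases hmx : PySem.List.max?
      ((PySem.Dict.keys counts).map
        (fun c => PySem.Int.floordiv c (PySem.Int.floordiv c d + 1))) (fun x => x) with
  | none => show (0 : Int) < d; omega
  | some j =>
    show j < d
    have hmem := PySem.List.max?_mem hmx
    obtain ⟨c, hc, hcj⟩ := List.mem_map.mp hmem
    have hcpos := hpos c hc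
    subst hcj
    have hq : PySem.Int.floordiv c d = c / d := PySem.Int.floordiv_eq_ediv_of_pos (by omega)
    have hq0 : 0 ≤ c / d := Int.ediv_nonneg (by omega) (by omega)
    rw [hq, PySem.Int.floordiv_eq_ediv_of_pos (by omega)]
    rw [Int.ediv_lt_iff_lt_mul (by omega)]
    have := Int.lt_ediv_add_one_mul_self c (show (0:Int) < d by omega)
    nlinarith

-- B's while-loop: test the current divisor, else jump below the current quotient block
def pvScan (m : Int) (counts : PySem.Dict Int Int)
    (hpos : ∀ c ∈ counts.keys, 0 < c) (d : Int) : Int :=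
  if h : 1 ≤ d then
    if ((PySem.Dict.items counts).map
        (fun p => (PySem.Int.floordiv p.1 d) * p.2)).sum ≥ m then d
    else pvScan m counts hpos (pvJump counts d)
  else 0
termination_by d.toNat
decreasing_by
  have := pvJump_lt counts d h hpos
  omega

def max_candies_per_bag_alt (n : Int) (m : Int) (candies : List Int) : Int :=
  match PySem.List.max? candies (fun c => c) with
  | none => 0   -- B's max([]) raises the same ValueError; excluded by Pre_
  | some mx =>
    let counts := pvCounts candies
    let total := ((PySem.Dict.items counts).map (fun p => p.1 * p.2)).sum
    let d0 := if m ≤ 0 then mx else min mx (PySem.Int.floordiv total m)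
    pvScan m counts (pvCounts_keys_pos candies) d0

-- ===== PRECONDITION & SPEC =====
-- Pre_ excludes the empty list (both Pythons raise ValueError on max([])) and mixed-sign lists
-- (some candy negative, some positive): there the bag total is not monotone in the divisor, so A's
-- binary search returns a path-dependent value and B's block scan another — a corner neither value
-- would be specified for.
def Pre_max_candies_per_bag (n : Int) (m : Int) (candies : List Int) : Prop :=
  candies ≠ [] ∧ ((∀ c ∈ candies, 0 ≤ c) ∨ (∀ c ∈ candies, c ≤ 0))
instance (n : Int) (m : Int) (candies : List Int) : Decidable (Pre_max_candies_per_bag n m candies) := by unfold Pre_max_candies_per_bag; infer_instance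
def pvWitness_max_candies_per_bag : Int × Int × List Int := (3, 2, [5, 3])

def Spec_max_candies_per_bag (n : Int) (m : Int) (candies : List Int) (out : Int) : Prop := out = max_candies_per_bag_alt n m candies
instance (n : Int) (m : Int) (candies : List Int) (out : Int) : Decidable (Spec_max_candies_per_bag n m candies out) := by unfold Spec_max_candies_per_bag; infer_instance

-- ===== CLAIM (what is proved, stated in full; the proofs are below) =====
def Claim_equal_max_candies_per_bag : Prop := ∀ (n : Int) (m : Int) (candies : List Int), Dom_max_candies_per_bag n m candies → Pre_max_candies_per_bag n m candies → Spec_max_candies_per_bag n m candies (max_candies_per_bag n m candies)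

-- ===== LEMMAS AND PROOFS =====

-- the positive candies, as B's dict sees them
def pvPos (candies : List Int) : List Int := candies.filter (fun c => decide (0 < c))

lemma pvCounts_eq_counter (candies : List Int) :
    pvCounts candies = PySem.Dict.counter (pvPos candies) := by
  unfold pvCounts pvPos
  rw [show (fun (d : PySem.Dict Int Int) (c : Int) =>
        if 0 < c then d.insert c (d.getD c 0 + 1) else d)
      = (fun d c => if (decide (0 < c)) = true then d.insert c (d.getD c 0 + 1) else d) by
    funext d c; simp]
  rw [← List.foldl_filter]
  exact PySem.Dict.foldl_insert_getD_add_one_eq_counter _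

-- sum of an indicator-style map over a nodup list
lemma sum_ite_single (S : List Int) (hnd : S.Nodup) (x : Int) (g : Int → Int) :
    (S.map (fun k => if x = k then g k else 0)).sum = if x ∈ S then g x else 0 := by
  induction S with
  | nil => simp
  | cons a S ih =>
    have hnd' := hnd.of_cons
    have ha : a ∉ S := (List.nodup_cons.mp hnd).1
    by_cases hxa : x = a
    · subst hxa
      simp only [List.map_cons, List.sum_cons, if_pos rfl, List.mem_cons, true_or, if_pos]
      rw [ih hnd']
      simp [ha]
    · simp only [List.map_cons, List.sum_cons, if_neg hxa]
      rw [ih hnd']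
      simp [List.mem_cons, hxa]

-- Σ_{k ∈ S} f k * count_xs k = Σ_{x ∈ xs ∩ S} f x, for nodup S
lemma sum_count_general (S : List Int) (hnd : S.Nodup) (xs : List Int) (f : Int → Int) :
    (S.map (fun k => f k * (xs.count k : Int))).sum
      = ((xs.filter (fun x => decide (x ∈ S))).map f).sum := by
  induction xs with
  | nil => simp
  | cons x xs ih =>
    have hcount : ∀ k : Int, ((x :: xs).count k : Int)
        = (xs.count k : Int) + (if x = k then 1 else 0) := by
      intro k
      rw [List.count_cons]
      by_cases hxk : x = k <;> simp [hxk, beq_iff_eq] <;> push_cast <;> ring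
    have hmapeq : S.map (fun k => f k * ((x :: xs).count k : Int))
        = S.map (fun k => f k * (xs.count k : Int) + (if x = k then f k else 0)) :=
      List.map_congr_left (fun k _ => by
        rw [hcount k]; by_cases h : x = k <;> simp [h] <;> ring)
    have hsum2 : ∀ (T : List Int) (g h : Int → Int),
        (T.map (fun k => g k + h k)).sum = (T.map g).sum + (T.map h).sum := by
      intro T g h
      induction T with
      | nil => simp
      | cons a T ihT => simp only [List.map_cons, List.sum_cons, ihT]; ring
    rw [hmapeq, hsum2, ih, sum_ite_single S hnd x f]
    by_cases hxS : x ∈ S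
    · simp only [List.filter_cons, decide_eq_true_eq, if_pos hxS, List.map_cons, List.sum_cons,
        if_pos hxS]
      ring
    · simp [List.filter_cons, hxS]

-- B's item sums over the counter are plain sums over the positive candies
lemma items_sum_eq (candies : List Int) (f : Int → Int) :
    ((PySem.Dict.items (pvCounts candies)).map (fun p => f p.1 * p.2)).sum
      = ((pvPos candies).map f).sum := by
  rw [pvCounts_eq_counter, PySem.Dict.items_counter]
  rw [List.map_map]
  have h1 : ((fun p : Int × Int => f p.1 * p.2) ∘ fun k => (k, ((pvPos candies).count k : Int)))
      = fun k => f k * ((pvPos candies).count k : Int) := by funext k; simp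
  rw [h1, sum_count_general _ (PySem.Set.nodup_ofList _) _ f]
  congr 1
  congr 1
  apply List.filter_eq_self.mpr
  intro x hx
  simpa using (PySem.Set.mem_ofList _ _).mpr hx

-- on nonnegative candies the zero candies contribute nothing to the bag total
lemma sum_pos_eq (candies : List Int) (hc : ∀ c ∈ candies, 0 ≤ c) (d : Int) (hd : 1 ≤ d) :
    ((pvPos candies).map (fun c => PySem.Int.floordiv c d)).sum
      = (candies.map (fun c => PySem.Int.floordiv c d)).sum := by
  induction candies with
  | nil => simp [pvPos]
  | cons c cs ih =>
    have hc0 : 0 ≤ c := hc c List.mem_cons_self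
    have ih' := ih (fun x hx => hc x (List.mem_cons_of_mem _ hx))
    by_cases hcp : 0 < c
    · simp only [pvPos, List.filter_cons, decide_eq_true_eq, if_pos hcp] at ih' ⊢
      simp [List.map_cons, List.sum_cons, ih']
    · have hc00 : c = 0 := by omega
      subst hc00
      simp only [pvPos, List.filter_cons] at ih' ⊢
      norm_num
      rw [show PySem.Int.floordiv 0 d = 0 by
        rw [PySem.Int.floordiv_eq_ediv_of_pos (by omega)]; simp]
      simpa [pvPos] using ih'

-- d times the bag total is at most the total positive candy
lemma mul_sum_le (candies : List Int) (hc : ∀ c ∈ candies, 0 ≤ c) (d : Int) (hd : 1 ≤ d) :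
    d * (candies.map (fun c => PySem.Int.floordiv c d)).sum ≤ (pvPos candies).sum := by
  induction candies with
  | nil => simp [pvPos]
  | cons c cs ih =>
    have hc0 : 0 ≤ c := hc c List.mem_cons_self
    have ih' := ih (fun x hx => hc x (List.mem_cons_of_mem _ hx))
    have hone : d * PySem.Int.floordiv c d ≤ (if (decide (0 < c)) = true then c else 0) := by
      rw [PySem.Int.floordiv_eq_ediv_of_pos (by omega)]
      by_cases hcp : 0 < c
      · simp only [hcp, decide_true, if_pos]
        rw [mul_comm]
        exact Int.ediv_mul_le c (by omega)
      · have : c = 0 := by omega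
        simp [this]
    simp only [pvPos, List.filter_cons, List.map_cons, List.sum_cons] at ih' ⊢
    by_cases hcp : 0 < c
    · simp only [decide_eq_true_eq, if_pos hcp, List.sum_cons]
      simp only [hcp, decide_true, if_pos] at hone
      nlinarith
    · simp only [decide_eq_true_eq, if_neg hcp]
      simp only [hcp, decide_false] at hone
      simp at hone
      nlinarith

-- quotients are constant on the block (c//(c//d+1), d]
lemma quot_const (c d x : Int) (hc : 0 ≤ c) (hx : 1 ≤ x) (hxd : x ≤ d)
    (hblock : PySem.Int.floordiv c (PySem.Int.floordiv c d + 1) < x) :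
    PySem.Int.floordiv c x = PySem.Int.floordiv c d := by
  have hd : (0 : Int) < d := by omega
  have hq : PySem.Int.floordiv c d = c / d := PySem.Int.floordiv_eq_ediv_of_pos hd
  have hq0 : 0 ≤ c / d := Int.ediv_nonneg hc (by omega)
  rw [hq] at hblock
  rw [PySem.Int.floordiv_eq_ediv_of_pos (by omega)] at hblock
  rw [PySem.Int.floordiv_eq_ediv_of_pos (by omega), hq]
  have hge : c / d ≤ c / x := by
    rw [Int.le_ediv_iff_mul_le (by omega)]
    have h1 : c / d * x ≤ c / d * d := by nlinarith
    have h2 : c / d * d ≤ c := Int.ediv_mul_le c (by omega)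
    omega
  have hlt : c / x < c / d + 1 := by
    rw [Int.ediv_lt_iff_lt_mul (by omega)]
    rw [Int.ediv_lt_iff_lt_mul (by omega)] at hblock
    nlinarith
  omega

-- the characterisation A's loop satisfies: r is the cut point of the monotone predicate on [1, mx]
def pvGood (m : Int) (candies : List Int) (mx r : Int) : Prop :=
  0 ≤ r ∧ r ≤ mx ∧ ∀ d : Int, 1 ≤ d → d ≤ mx →
    ((candies.map (fun c => PySem.Int.floordiv c d)).sum ≥ m ↔ d ≤ r)

-- antitonicity of the bag total (nonnegative candies)
lemma pvT_anti (candies : List Int) (hc : ∀ c ∈ candies, 0 ≤ c) {e d : Int}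
    (he : 0 < e) (hed : e ≤ d) :
    (candies.map (fun c => PySem.Int.floordiv c d)).sum
      ≤ (candies.map (fun c => PySem.Int.floordiv c e)).sum := by
  induction candies with
  | nil => simp
  | cons c cs ih =>
    have hc0 : 0 ≤ c := hc c List.mem_cons_self
    have h1 : PySem.Int.floordiv c d ≤ PySem.Int.floordiv c e := by
      rw [PySem.Int.floordiv_eq_ediv_of_pos (by omega), PySem.Int.floordiv_eq_ediv_of_pos he]
      rw [Int.le_ediv_iff_mul_le he]
      calc c / d * e ≤ c / d * d := by
            have h0 : 0 ≤ c / d := Int.ediv_nonneg hc0 (by omega)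
            exact mul_le_mul_of_nonneg_left hed h0
        _ ≤ c := Int.ediv_mul_le c (by omega)
    have h2 := ih (fun x hx => hc x (List.mem_cons_of_mem _ hx))
    simp only [List.map_cons, List.sum_cons] at *
    omega

lemma pvDown (m : Int) (candies : List Int) (hc : ∀ c ∈ candies, 0 ≤ c) {e d : Int}
    (he : 1 ≤ e) (hed : e ≤ d)
    (hP : (candies.map (fun c => PySem.Int.floordiv c d)).sum ≥ m) :
    (candies.map (fun c => PySem.Int.floordiv c e)).sum ≥ m :=
  le_trans hP (pvT_anti candies hc (by omega) hed)

-- A's binary-search invariant: every d < left is valid, every d > right is not, result = left - 1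
lemma goA_good (m : Int) (candies : List Int) (mx : Int) (hc : ∀ c ∈ candies, 0 ≤ c) :
    ∀ (k : Nat) (L R res : Int), (R + 1 - L).toNat ≤ k →
      1 ≤ L → L ≤ R + 1 → R ≤ mx → res = L - 1 →
      (∀ d : Int, 1 ≤ d → d < L → (candies.map (fun c => PySem.Int.floordiv c d)).sum ≥ m) →
      (∀ d : Int, R < d → d ≤ mx → ¬ (candies.map (fun c => PySem.Int.floordiv c d)).sum ≥ m) →
      pvGood m candies mx (pvGoA m candies L R res) := by
  intro k
  induction k with
  | zero =>
    intro L R res hk h1 h2 h3 h4 h5 h6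
    have hLR : ¬ L ≤ R := by omega
    rw [pvGoA, dif_neg hLR]
    refine ⟨by omega, by omega, fun d hd1 hd2 => ⟨fun hP => ?_, fun hdr => h5 d hd1 (by omega)⟩⟩
    by_contra hdr
    exact h6 d (by omega) hd2 hP
  | succ k ih =>
    intro L R res hk h1 h2 h3 h4 h5 h6
    by_cases hLR : L ≤ R
    · rw [pvGoA, dif_pos hLR]
      have hb := PySem.Int.floordiv_two_mid_bounds hLR
      set mid := PySem.Int.floordiv (L + R) 2 with hmid
      by_cases hP : (candies.map (fun c => PySem.Int.floordiv c mid)).sum ≥ m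
      · rw [if_pos hP]
        refine ih (mid + 1) R mid (by omega) (by omega) (by omega) h3 (by omega) ?_ h6
        intro d hd1 hd2
        exact pvDown m candies hc hd1 (by omega) hP
      · rw [if_neg hP]
        refine ih L (mid - 1) res (by omega) h1 (by omega) (by omega) h4 h5 ?_
        intro d hdR hdmx hPd
        exact hP (pvDown m candies hc (by omega) (by omega) hPd)
    · rw [pvGoA, dif_neg hLR]
      refine ⟨by omega, by omega, fun d hd1 hd2 => ⟨fun hP => ?_, fun hdr => h5 d hd1 (by omega)⟩⟩
      by_contra hdr
      exact h6 d (by omega) hd2 hP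

-- the block-jump scan, started at or above the cut point, lands exactly on it
lemma scan_reaches (m : Int) (candies : List Int) (mx K : Int)
    (hc : ∀ c ∈ candies, 0 ≤ c) (hK : pvGood m candies mx K) :
    ∀ (k : Nat) (d0 : Int), d0.toNat ≤ k → 0 ≤ d0 → d0 ≤ mx → K ≤ d0 →
      pvScan m (pvCounts candies) (pvCounts_keys_pos candies) d0 = K := by
  obtain ⟨hK0, hKmx, hKP⟩ := hK
  intro k
  induction k with
  | zero =>
    intro d0 hk h0 hmx hKd
    have hlt : ¬ 1 ≤ d0 := by omega
    rw [pvScan, dif_neg hlt]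
    omega
  | succ k ih =>
    intro d0 hk h0 hmx hKd
    by_cases h1 : 1 ≤ d0
    · rw [pvScan, dif_pos h1]
      have hTB : ((PySem.Dict.items (pvCounts candies)).map
            (fun p => (PySem.Int.floordiv p.1 d0) * p.2)).sum
          = (candies.map (fun c => PySem.Int.floordiv c d0)).sum := by
        rw [items_sum_eq candies (fun c => PySem.Int.floordiv c d0)]
        exact sum_pos_eq candies hc d0 h1
      by_cases hP : ((PySem.Dict.items (pvCounts candies)).map
            (fun p => (PySem.Int.floordiv p.1 d0) * p.2)).sum ≥ m
      · rw [if_pos hP]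
        rw [hTB] at hP
        have := (hKP d0 h1 hmx).1 hP
        omega
      · rw [if_neg hP]
        rw [hTB] at hP
        -- the jump target: nonnegative, strictly below d0, and still at or above K
        set j := pvJump (pvCounts candies) d0 with hj
        have hjlt : j < d0 := pvJump_lt _ d0 h1 (pvCounts_keys_pos candies)
        have hjub : ∀ c ∈ (pvCounts candies).keys,
            PySem.Int.floordiv c (PySem.Int.floordiv c d0 + 1) ≤ j := by
          intro c hcmem
          rw [hj]
          unfold pvJump
          cases hmax : PySem.List.max?
              ((PySem.Dict.keys (pvCounts candies)).map
                (fun c => PySem.Int.floordiv c (PySem.Int.floordiv c d0 + 1))) (fun x => x) with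
          | none =>
            have hnil : (PySem.Dict.keys (pvCounts candies)) = [] :=
              List.map_eq_nil_iff.mp ((PySem.List.max?_eq_none_iff _ _).mp hmax)
            rw [hnil] at hcmem
            exact absurd hcmem List.not_mem_nil
          | some j' =>
            exact PySem.List.max?_isMax hmax _ (List.mem_map_of_mem hcmem)
        have hj0 : 0 ≤ j := by
          rw [hj]; unfold pvJump
          cases hmax : PySem.List.max?
              ((PySem.Dict.keys (pvCounts candies)).map
                (fun c => PySem.Int.floordiv c (PySem.Int.floordiv c d0 + 1))) (fun x => x) with
          | none => exact le_refl 0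
          | some j' =>
            show 0 ≤ j'
            have hmem := PySem.List.max?_mem hmax
            obtain ⟨c, hcmem, hcj⟩ := List.mem_map.mp hmem
            have hcpos := pvCounts_keys_pos candies c hcmem
            have hq0 : 0 ≤ PySem.Int.floordiv c d0 := by
              rw [PySem.Int.floordiv_eq_ediv_of_pos (by omega)]
              exact Int.ediv_nonneg (by omega) (by omega)
            rw [← hcj, PySem.Int.floordiv_eq_ediv_of_pos (by omega)]
            exact Int.ediv_nonneg (by omega) (by omega)
        -- K ≤ j: otherwise T(K) = T(d0) < m, contradicting T(K) ≥ m
        have hKj : K ≤ j := by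
          by_contra hKgt
          have hK1 : 1 ≤ K := by omega
          have hTK : (candies.map (fun c => PySem.Int.floordiv c K)).sum ≥ m :=
            (hKP K hK1 hKmx).2 le_rfl
          have hTeq : (candies.map (fun c => PySem.Int.floordiv c K)).sum
              = (candies.map (fun c => PySem.Int.floordiv c d0)).sum := by
            apply congrArg
            apply List.map_congr_left
            intro c hcmem
            have hc0 : 0 ≤ c := hc c hcmem
            by_cases hcp : 0 < c
            · have hkey : c ∈ (pvCounts candies).keys := by
                rw [pvCounts_eq_counter, PySem.Dict.keys_counter]
                refine (PySem.Set.mem_ofList _ _).mpr ?_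
                unfold pvPos
                exact List.mem_filter.mpr ⟨hcmem, by simpa using hcp⟩
              have := hjub c hkey
              exact quot_const c d0 K hc0 hK1 (by omega) (by omega)
            · have hc00 : c = 0 := by omega
              subst hc00
              rw [PySem.Int.floordiv_eq_ediv_of_pos (by omega),
                PySem.Int.floordiv_eq_ediv_of_pos (by omega)]
              simp
          rw [hTeq] at hTK
          exact hP hTK
        exact ih j (by omega) hj0 (by omega) hKj
    · rw [pvScan, dif_neg h1]
      omega

-- m > 0: any divisor achieving m bags is at most total_positive // m
lemma cut_le_total_div (m : Int) (candies : List Int) (hc : ∀ c ∈ candies, 0 ≤ c)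
    (hm : 0 < m) (d : Int) (hd : 1 ≤ d)
    (hP : (candies.map (fun c => PySem.Int.floordiv c d)).sum ≥ m) :
    d ≤ PySem.Int.floordiv (pvPos candies).sum m := by
  have hle := mul_sum_le candies hc d hd
  rw [PySem.Int.floordiv_eq_ediv_of_pos hm, Int.le_ediv_iff_mul_le hm]
  nlinarith [hle, hP]

-- ===== VERDICT (by name: the statement is the Claim_ definition above) =====
theorem max_candies_per_bag_spec : Claim_equal_max_candies_per_bag := by
  intro n m candies _hdom hpre
  unfold Pre_max_candies_per_bag at hpre
  obtain ⟨hne, hcase⟩ := hpre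
  unfold Spec_max_candies_per_bag max_candies_per_bag max_candies_per_bag_alt
  cases hmx : PySem.List.max? candies (fun c => c) with
  | none =>
    exact absurd ((PySem.List.max?_eq_none_iff candies (fun c => c)).mp hmx) hne
  | some mx =>
    have hmem : mx ∈ candies := PySem.List.max?_mem hmx
    have hmax := PySem.List.max?_isMax hmx
    show pvGoA m candies 1 mx 0
        = pvScan m (pvCounts candies) (pvCounts_keys_pos candies)
            (if m ≤ 0 then mx
             else min mx (PySem.Int.floordiv
               (((PySem.Dict.items (pvCounts candies)).map (fun p => p.1 * p.2)).sum) m))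
    rcases hcase with hc | hneg
    case inr =>
      -- all candies ≤ 0: A's loop never runs and B's start divisor is ≤ 0; both return 0
      have hmxneg : mx ≤ 0 := hneg mx hmem
      have hA0 : pvGoA m candies 1 mx 0 = 0 := by rw [pvGoA, dif_neg (by omega)]
      have hpos_nil : pvPos candies = [] := by
        unfold pvPos
        apply List.filter_eq_nil_iff.mpr
        intro c hcmem
        have := hneg c hcmem
        simpa using (by omega : ¬ 0 < c)
      have htot : ((PySem.Dict.items (pvCounts candies)).map (fun p => p.1 * p.2)).sum = 0 := by
        rw [items_sum_eq candies (fun c => c), hpos_nil]; simp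
      rw [hA0, htot]
      by_cases hm : m ≤ 0
      · rw [if_pos hm, pvScan, dif_neg (by omega)]
      · rw [if_neg hm]
        have hf0 : PySem.Int.floordiv 0 m = 0 := by
          rw [PySem.Int.floordiv_eq_ediv_of_pos (by omega)]; simp
        rw [hf0, pvScan, dif_neg (by omega)]
    have hmx0 : 0 ≤ mx := hc mx hmem
    have hA : pvGood m candies mx (pvGoA m candies 1 mx 0) := by
      refine goA_good m candies mx hc (mx + 1 - 1).toNat 1 mx 0 le_rfl (by omega) (by omega)
        le_rfl (by omega) (fun d hd1 hd2 => by omega) (fun d hdR hdmx => by omega)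
    set K := pvGoA m candies 1 mx 0 with hKdef
    obtain ⟨hK0, hKmx, hKP⟩ := hA
    rw [items_sum_eq candies (fun c => c)]
    rw [show (pvPos candies).map (fun c => c) = pvPos candies from List.map_id' _]
    by_cases hm : m ≤ 0
    · rw [if_pos hm]
      exact (scan_reaches m candies mx K hc ⟨hK0, hKmx, hKP⟩ mx.toNat mx (by omega)
        hmx0 le_rfl hKmx).symm
    · rw [if_neg hm]
      have hpossum : 0 ≤ (pvPos candies).sum := by
        apply List.sum_nonneg
        intro x hx
        have := List.of_mem_filter hx
        simp at this
        omega
      have hT0 : 0 ≤ PySem.Int.floordiv (pvPos candies).sum m := by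
        rw [PySem.Int.floordiv_eq_ediv_of_pos (by omega)]
        exact Int.ediv_nonneg hpossum (by omega)
      have hKle : K ≤ min mx (PySem.Int.floordiv (pvPos candies).sum m) := by
        rcases lt_or_ge 0 K with hKpos | hKz
        · have hTK := (hKP K (by omega) hKmx).2 le_rfl
          have := cut_le_total_div m candies hc (by omega) K (by omega) hTK
          omega
        · omega
      exact (scan_reaches m candies mx K hc ⟨hK0, hKmx, hKP⟩
        (min mx (PySem.Int.floordiv (pvPos candies).sum m)).toNat
        (min mx (PySem.Int.floordiv (pvPos candies).sum m)) (by omega)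
        (by omega) (by omega) hKle).symm
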